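-- pv_equiv track=rewrite | github.com/EchoRover/adventofcode2016 | day7/part2.py | support_ssl
-- ===== SOURCE A (Python) =====
-- def isaba(text,check = None):
-- 	listaba  = []
-- 	listrev = []
-- 	for i in range(0,len(text) - 2):
-- 		if text[i] == text[i + 1]:
-- 			continue
--
-- 		if text[i] == text[i + 2]:
-- 			tt = (text[i:i + 3])
--
-- 			if check is not None and tt in check:
-- 				return True
--
-- 			listrev.append(text[i + 1] + text[i] + text[i + 1])
--
-- 	if check is not None:
-- 		return False
--
--
-- 	return listrev
--
-- def support_ssl(code):
--
-- 	abba = []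
-- 	hypernet = []
-- 	text = ""
-- 	ishyper = False
-- 	for i in code:
-- 		if i == "[":
-- 			ishyper = True
-- 			abba.append(text)
-- 			text = ""
--
-- 		elif i == "]":
-- 			ishyper = False
-- 			hypernet.append(text)
-- 			text  = ""
-- 		else:
-- 			text += i
-- 	if text:
-- 		abba.append(text)
--
-- 	codes = []
--
-- 	for i in abba:
-- 		codes.extend(isaba(i))
--
-- 	if not codes:
-- 		return
--
-- 	if any([isaba(i,codes) for i in hypernet]):
-- 		return True
--
--
--
-- 	return False
-- ===== SOURCE B (Python) =====
-- def support_ssl(code):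
--     supers = set()    # BAB forms collected from supernet segments
--     hypers = set()    # ABA substrings collected from hypernet segments
--     seg_babs = set()
--     seg_abas = set()
--     w = ""            # last (up to) two chars of the current segment
--     for c in code:
--         if c == '[':
--             supers |= seg_babs
--             seg_babs, seg_abas, w = set(), set(), ""
--         elif c == ']':
--             hypers |= seg_abas
--             seg_babs, seg_abas, w = set(), set(), ""
--         else:
--             if len(w) == 2 and w[0] == c and w[1] != c:
--                 seg_abas.add(w[0] + w[1] + c)
--                 seg_babs.add(w[1] + w[0] + w[1])
--             w = (w + c)[-2:]
--     supers |= seg_babs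
--     if not supers:
--         return None
--     return bool(supers & hypers)
-- ===== Notes on version B (the rewrite author's own statement) =====
-- stated objective: alternative
-- what changed: Replaces A's three-phase design (accumulate segment lists, a reusable isaba helper run per segment in list mode and again in membership mode, any() over a list comprehension) by a single character-level scan that classifies each ABA via a 2-char sliding window directly into four sets as brackets are crossed, finishing with one set intersection.
import Mathlib
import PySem

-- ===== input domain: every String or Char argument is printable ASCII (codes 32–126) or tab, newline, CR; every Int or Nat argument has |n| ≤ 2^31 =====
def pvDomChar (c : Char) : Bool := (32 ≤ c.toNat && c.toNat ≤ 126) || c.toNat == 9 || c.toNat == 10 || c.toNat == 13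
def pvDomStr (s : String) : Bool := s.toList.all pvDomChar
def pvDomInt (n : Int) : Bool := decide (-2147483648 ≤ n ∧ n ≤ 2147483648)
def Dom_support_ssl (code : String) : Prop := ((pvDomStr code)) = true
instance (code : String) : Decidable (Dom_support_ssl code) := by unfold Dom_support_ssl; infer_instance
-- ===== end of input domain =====

-- B replaces A's segment-lists + per-segment isaba helper by a single sliding-window scan into four sets (alternative decomposition, same behaviour).
-- Strings are represented as List Char internally (exact: only char equality and concatenation are used).

-- ===== PORT A =====
-- isaba(text) with check=None: returns the list of b+a+b strings, in scan order
def isabaList : List Char → List (List Char)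
  | a :: b :: c :: rest =>
      if a = b then isabaList (b :: c :: rest)
      else if a = c then [b, a, b] :: isabaList (b :: c :: rest)
      else isabaList (b :: c :: rest)
  | _ => []

-- isaba(text, check) with check given: True as soon as some aba substring is in check, else False
def isabaCheck : List Char → List (List Char) → Bool
  | a :: b :: c :: rest, check =>
      if a = b then isabaCheck (b :: c :: rest) check
      else if a = c then
        if [a, b, c] ∈ check then true else isabaCheck (b :: c :: rest) check
      else isabaCheck (b :: c :: rest) check
  | _, _ => false

-- the body of A's "for i in code" segmentation loop (state: abba, hypernet, text, ishyper)
def segStep (st : List (List Char) × List (List Char) × List Char × Bool) (c : Char) :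
    List (List Char) × List (List Char) × List Char × Bool :=
  match st with
  | (abba, hyper, text, ishyper) =>
    if c = '[' then (abba ++ [text], hyper, [], true)
    else if c = ']' then (abba, hyper ++ [text], [], false)
    else (abba, hyper, text ++ [c], ishyper)

def support_ssl (code : String) : Option Bool :=
  match code.toList.foldl segStep ([], [], [], false) with
  | (abba, hyper, text, _) =>
    let abba := if text ≠ [] then abba ++ [text] else abba   -- if text: abba.append(text)
    let codes := abba.foldl (fun acc t => acc ++ isabaList t) []   -- codes.extend(isaba(i))
    if codes = [] then none                                   -- bare "return"
    else if (hyper.map (fun h => isabaCheck h codes)).any id then some true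
    else some false

-- ===== PORT B =====
-- the body of B's single scan (state: supers, hypers, seg_babs, seg_abas, w)
def bStep (st : PySem.Set (List Char) × PySem.Set (List Char) × PySem.Set (List Char) × PySem.Set (List Char) × List Char) (c : Char) :
    PySem.Set (List Char) × PySem.Set (List Char) × PySem.Set (List Char) × PySem.Set (List Char) × List Char :=
  match st with
  | (S, H, sb, sa, w) =>
    if c = '[' then (PySem.Set.union S sb, H, PySem.Set.empty, PySem.Set.empty, [])
    else if c = ']' then (S, PySem.Set.union H sa, PySem.Set.empty, PySem.Set.empty, [])
    else
      match w with
      | [a, b] =>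
          if a = c ∧ b ≠ c then
            (S, H, PySem.Set.add sb [b, a, b], PySem.Set.add sa [a, b, c], [b, c])
          else (S, H, sb, sa, [b, c])
      | _ => (S, H, sb, sa, w ++ [c])     -- (w + c)[-2:] with len(w) < 2

def support_ssl_alt (code : String) : Option Bool :=
  match code.toList.foldl bStep (PySem.Set.empty, PySem.Set.empty, PySem.Set.empty, PySem.Set.empty, []) with
  | (S, H, sb, _, _) =>
    let S := PySem.Set.union S sb                -- supers |= seg_babs (trailing segment)
    if S = [] then none                          -- if not supers: return None
    else some (!(PySem.Set.inter S H).isEmpty)   -- bool(supers & hypers)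

-- ===== PRECONDITION & SPEC =====
def Spec_support_ssl (code : String) (out : Option Bool) : Prop := out = support_ssl_alt code
instance (code : String) (out : Option Bool) : Decidable (Spec_support_ssl code out) := by unfold Spec_support_ssl; infer_instance

-- ===== CLAIM (what is proved, stated in full; the proofs are below) =====
def Claim_equal_support_ssl : Prop := ∀ (code : String), Dom_support_ssl code → Spec_support_ssl code (support_ssl code)

-- ===== LEMMAS AND PROOFS =====

-- spec helper: the list of aba substrings of a segment, in scan order (mirrors isabaCheck's probes)
def pvAbas : List Char → List (List Char)
  | a :: b :: c :: rest =>
      if a = b then pvAbas (b :: c :: rest)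
      else if a = c then [a, b, c] :: pvAbas (b :: c :: rest)
      else pvAbas (b :: c :: rest)
  | _ => []

-- spec helper: the last (up to) two characters of a segment
def pvLast2 : List Char → List Char
  | _ :: b :: c :: rest => pvLast2 (b :: c :: rest)
  | w => w

lemma pvLast2_short : ∀ t : List Char, (pvLast2 t).length ≤ 2
  | [] => by simp [pvLast2]
  | [_] => by simp [pvLast2]
  | [_, _] => by simp [pvLast2]
  | _ :: b :: c :: rest => by
      simpa [pvLast2] using pvLast2_short (b :: c :: rest)

lemma pvLast2_snoc : ∀ (t : List Char) (d : Char),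
    pvLast2 (t ++ [d]) = pvLast2 (pvLast2 t ++ [d])
  | [], _ => rfl
  | [_], _ => rfl
  | [_, _], _ => rfl
  | a :: b :: c :: rest, d => by
      simpa [pvLast2] using pvLast2_snoc (b :: c :: rest) d

-- the three-char tail emitted when d is appended after window w
def pvEmitA (w : List Char) (d : Char) : List (List Char) :=
  match w with
  | [a, b] => if a = b then [] else if a = d then [[a, b, d]] else []
  | _ => []

def pvEmitB (w : List Char) (d : Char) : List (List Char) :=
  match w with
  | [a, b] => if a = b then [] else if a = d then [[b, a, b]] else []
  | _ => []

lemma pvAbas_snoc : ∀ (t : List Char) (d : Char),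
    pvAbas (t ++ [d]) = pvAbas t ++ pvEmitA (pvLast2 t) d
  | [], _ => rfl
  | [_], _ => rfl
  | [a, b], d => by
      by_cases h1 : a = b <;> by_cases h2 : a = d <;>
        simp [pvAbas, pvLast2, pvEmitA, h1, h2]
  | a :: b :: c :: rest, d => by
      have ih := pvAbas_snoc (b :: c :: rest) d
      simp only [List.cons_append] at ih ⊢
      simp only [pvAbas, pvLast2]
      rw [ih]
      split_ifs <;> simp

lemma isabaList_snoc : ∀ (t : List Char) (d : Char),
    isabaList (t ++ [d]) = isabaList t ++ pvEmitB (pvLast2 t) d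
  | [], _ => rfl
  | [_], _ => rfl
  | [a, b], d => by
      by_cases h1 : a = b <;> by_cases h2 : a = d <;>
        simp [isabaList, pvLast2, pvEmitB, h1, h2]
  | a :: b :: c :: rest, d => by
      have ih := isabaList_snoc (b :: c :: rest) d
      simp only [List.cons_append] at ih ⊢
      simp only [isabaList, pvLast2]
      rw [ih]
      split_ifs <;> simp

lemma isabaCheck_iff : ∀ (t : List Char) (check : List (List Char)),
    isabaCheck t check = true ↔ ∃ x ∈ pvAbas t, x ∈ check
  | [], _ => by simp [isabaCheck, pvAbas]
  | [_], _ => by simp [isabaCheck, pvAbas]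
  | [_, _], _ => by simp [isabaCheck, pvAbas]
  | a :: b :: c :: rest, check => by
      have ih := isabaCheck_iff (b :: c :: rest) check
      simp only [isabaCheck, pvAbas]
      split_ifs with h1 h2 h3
      · exact ih
      · exact iff_of_true rfl ⟨[a, b, c], by simp, h3⟩
      · rw [ih]; simp [h3]
      · exact ih

-- the coupling invariant between A's segmentation state and B's scan state
def pvInv (sA : List (List Char) × List (List Char) × List Char × Bool)
    (sB : PySem.Set (List Char) × PySem.Set (List Char) × PySem.Set (List Char) × PySem.Set (List Char) × List Char) : Prop :=
  match sA, sB with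
  | (abba, hyper, text, _), (S, H, sb, sa, w) =>
    (∀ x, x ∈ S ↔ x ∈ abba.flatMap isabaList) ∧
    (∀ x, x ∈ H ↔ ∃ h ∈ hyper, x ∈ pvAbas h) ∧
    (∀ x, x ∈ sb ↔ x ∈ isabaList text) ∧
    (∀ x, x ∈ sa ↔ x ∈ pvAbas text) ∧
    w = pvLast2 text

lemma pvInv_step (sA : List (List Char) × List (List Char) × List Char × Bool)
    (sB : PySem.Set (List Char) × PySem.Set (List Char) × PySem.Set (List Char) × PySem.Set (List Char) × List Char)
    (c : Char) (h : pvInv sA sB) : pvInv (segStep sA c) (bStep sB c) := by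
  obtain ⟨abba, hyper, text, ishyper⟩ := sA
  obtain ⟨S, H, sb, sa, w⟩ := sB
  obtain ⟨hS, hH, hsb, hsa, hw⟩ := h
  by_cases h1 : c = '['
  · simp only [segStep, bStep, if_pos h1]
    refine ⟨fun x => ?_, hH, by simp [isabaList, PySem.Set.empty], by simp [pvAbas, PySem.Set.empty], by simp [pvLast2]⟩
    rw [PySem.Set.mem_union]
    simp [hS x, hsb x, List.flatMap_append]
  by_cases h2 : c = ']'
  · simp only [segStep, bStep, if_neg h1, if_pos h2]
    refine ⟨hS, fun x => ?_, by simp [isabaList, PySem.Set.empty], by simp [pvAbas, PySem.Set.empty], by simp [pvLast2]⟩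
    rw [PySem.Set.mem_union]
    simp only [hH x, hsa x, List.mem_append]
    constructor
    · rintro (⟨hh, h3, h4⟩ | h4)
      · exact ⟨hh, by simp [h3], h4⟩
      · exact ⟨text, by simp, h4⟩
    · rintro ⟨hh, h3, h4⟩
      rcases h3 with h3 | h3
      · exact Or.inl ⟨hh, h3, h4⟩
      · simp at h3; subst h3; exact Or.inr h4
  · simp only [segStep, bStep, if_neg h1, if_neg h2]
    have hA := pvAbas_snoc text c
    have hB := isabaList_snoc text c
    have hL := pvLast2_snoc text c
    have hshort := pvLast2_short text
    rw [← hw] at hA hB hL hshort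
    rcases hwv : w with _ | ⟨a, _ | ⟨b, _ | ⟨e, tl⟩⟩⟩ <;> subst hwv
    · exact ⟨hS, hH, by simp [hB, pvEmitB, hsb], by simp [hA, pvEmitA, hsa],
        by simp [hL, pvLast2]⟩
    · exact ⟨hS, hH, by simp [hB, pvEmitB, hsb], by simp [hA, pvEmitA, hsa],
        by simp [hL, pvLast2]⟩
    · by_cases hc1 : a = c ∧ b ≠ c
      · have hab : ¬ a = b := by rintro rfl; exact hc1.2 hc1.1
        have hcb : ¬ c = b := fun hh => hc1.2 hh.symm
        simp only [if_pos hc1]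
        refine ⟨hS, hH, fun x => ?_, fun x => ?_, by simp [hL, pvLast2]⟩
        · rw [PySem.Set.mem_add]
          simp [hB, pvEmitB, hcb, hc1.1, hsb x]
        · rw [PySem.Set.mem_add]
          simp [hA, pvEmitA, hcb, hc1.1, hsa x]
      · simp only [if_neg hc1]
        have hemit : pvEmitA [a, b] c = [] ∧ pvEmitB [a, b] c = [] := by
          rcases Decidable.em (a = b) with hab | hab
          · simp [pvEmitA, pvEmitB, hab]
          · have hac : ¬ a = c := by
              intro hac
              rcases Decidable.em (b = c) with hbc | hbc
              · exact hab (hac.trans hbc.symm)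
              · exact hc1 ⟨hac, hbc⟩
            simp [pvEmitA, pvEmitB, hab, hac]
        exact ⟨hS, hH, by simp [hB, hemit.2, hsb], by simp [hA, hemit.1, hsa],
          by simp [hL, pvLast2]⟩
    · exfalso; simp at hshort

lemma pvInv_foldl : ∀ (l : List Char) sA sB, pvInv sA sB →
    pvInv (l.foldl segStep sA) (l.foldl bStep sB)
  | [], _, _, h => h
  | c :: rest, sA, sB, h => by
      simpa [List.foldl] using pvInv_foldl rest _ _ (pvInv_step sA sB c h)

lemma pvInv_init : pvInv (([], [], [], false) : List (List Char) × List (List Char) × List Char × Bool)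
    ((PySem.Set.empty, PySem.Set.empty, PySem.Set.empty, PySem.Set.empty, []) :
      PySem.Set (List Char) × PySem.Set (List Char) × PySem.Set (List Char) × PySem.Set (List Char) × List Char) := by
  refine ⟨?_, ?_, ?_, ?_, rfl⟩ <;> simp [PySem.Set.empty, isabaList, pvAbas]

-- ===== VERDICT (by name: the statement is the Claim_ definition above) =====
theorem support_ssl_spec : Claim_equal_support_ssl := by
  intro code _
  show support_ssl code = support_ssl_alt code
  have hInv := pvInv_foldl code.toList _ _ pvInv_init
  unfold support_ssl support_ssl_alt
  rcases hfA : code.toList.foldl segStep ([], [], [], false) with ⟨abba, hyper, text, ishyper⟩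
  rcases hfB : code.toList.foldl bStep
      (PySem.Set.empty, PySem.Set.empty, PySem.Set.empty, PySem.Set.empty, []) with ⟨S, H, sb, sa, w⟩
  rw [hfA, hfB] at hInv
  obtain ⟨hS, hH, hsb, hsa, hw⟩ := hInv
  simp only
  rw [PySem.List.foldl_append_eq_flatMap isabaList _ []]
  simp only [List.nil_append]
  -- the trailing-segment sets on both sides have the same members
  have hmem : ∀ x, x ∈ PySem.Set.union S sb ↔
      x ∈ List.flatMap isabaList (if text ≠ [] then abba ++ [text] else abba) := by
    intro x
    rw [PySem.Set.mem_union]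
    by_cases ht : text = []
    · simp [ht, hS x, hsb x, isabaList]
    · simp [ht, hS x, hsb x, List.flatMap_append]
  have hempty : (PySem.Set.union S sb = []) ↔
      (List.flatMap isabaList (if text ≠ [] then abba ++ [text] else abba) = []) := by
    rw [List.eq_nil_iff_forall_not_mem, List.eq_nil_iff_forall_not_mem]
    exact forall_congr' fun x => not_congr (hmem x)
  by_cases hc : List.flatMap isabaList (if text ≠ [] then abba ++ [text] else abba) = []
  · rw [if_pos hc, if_pos (hempty.2 hc)]
  · rw [if_neg hc, if_neg (fun hh => hc (hempty.1 hh))]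
    -- both remaining answers wrap the same Bool
    have hbool : ((hyper.map fun h =>
          isabaCheck h (List.flatMap isabaList (if text ≠ [] then abba ++ [text] else abba))).any id) =
        (!(PySem.Set.inter (PySem.Set.union S sb) H).isEmpty) := by
      rw [Bool.eq_iff_iff]
      have hL : ((hyper.map fun h =>
            isabaCheck h (List.flatMap isabaList (if text ≠ [] then abba ++ [text] else abba))).any id) = true ↔
          ∃ h0 ∈ hyper, ∃ x ∈ pvAbas h0,
            x ∈ List.flatMap isabaList (if text ≠ [] then abba ++ [text] else abba) := by
        simp only [List.any_eq_true, List.mem_map, id_eq]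
        constructor
        · rintro ⟨b, ⟨h0, hh0, rfl⟩, hck⟩
          exact ⟨h0, hh0, (isabaCheck_iff _ _).1 hck⟩
        · rintro ⟨h0, hh0, hex⟩
          exact ⟨_, ⟨h0, hh0, rfl⟩, (isabaCheck_iff _ _).2 hex⟩
      have hR : (!(PySem.Set.inter (PySem.Set.union S sb) H).isEmpty) = true ↔
          ∃ x, x ∈ PySem.Set.inter (PySem.Set.union S sb) H := by
        constructor
        · intro h
          have hne : PySem.Set.inter (PySem.Set.union S sb) H ≠ [] := by
            intro hh
            rw [hh] at h
            simp at h
          exact List.exists_mem_of_ne_nil _ hne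
        · rintro ⟨x, hx⟩
          have hne : PySem.Set.inter (PySem.Set.union S sb) H ≠ [] := fun hh => by simp [hh] at hx
          simp [hne]
      refine Iff.trans hL (Iff.trans ?_ hR.symm)
      constructor
      · rintro ⟨h0, hh0, x, hx1, hx2⟩
        exact ⟨x, (PySem.Set.mem_inter _ _ _).2 ⟨(hmem x).2 hx2, (hH x).2 ⟨h0, hh0, hx1⟩⟩⟩
      · rintro ⟨x, hx⟩
        obtain ⟨hx1, hx2⟩ := (PySem.Set.mem_inter _ _ _).1 hx
        obtain ⟨h0, hh0, hx3⟩ := (hH x).1 hx2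
        exact ⟨h0, hh0, x, hx3, (hmem x).1 hx1⟩
    simp only [hbool]
    split <;> simp_all
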